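-- pv_equiv track=rewrite | github.com/bariscan97/leetcode-solutions | two-pointer/3727. Maximum Alternating Sum of Squares.py | maxAlternatingSum
-- ===== SOURCE A (Python) =====
-- from typing import List
--
-- def maxAlternatingSum(nums: List[int]) -> int:
--     nums.sort(key=lambda x:abs(x))
--     res = 0
--     l, r = 0, len(nums) - 1
--
--     while r >= l:
--         if r != l:
--             res += nums[r] ** 2 - nums[l] ** 2
--         else:
--             res += nums[r] ** 2
--         r -= 1
--         l += 1
--
--     return res
-- ===== SOURCE B (Python) =====
-- def maxAlternatingSum(nums):
--     sq = [x * x for x in nums]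
--     half = len(sq) // 2
--     res = 0
--     for i, s in enumerate(sq):
--         rank = 0
--         for j, t in enumerate(sq):
--             if t < s or (t == s and j < i):
--                 rank += 1
--         res += s if rank >= half else -s
--     return res
-- ===== Notes on version B (the rewrite author's own statement) =====
-- stated objective: alternative
-- what changed: B does no sorting at all: for each element it counts (by pairwise comparison with a stable index tie-break) how many squares precede it, and adds the square with + if that rank falls in the upper half and - otherwise, whereas A sorts by absolute value and pairs opposite ends with two pointers; A sorts its argument in place while B does not mutate it (return values are equal).
import Mathlib
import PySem

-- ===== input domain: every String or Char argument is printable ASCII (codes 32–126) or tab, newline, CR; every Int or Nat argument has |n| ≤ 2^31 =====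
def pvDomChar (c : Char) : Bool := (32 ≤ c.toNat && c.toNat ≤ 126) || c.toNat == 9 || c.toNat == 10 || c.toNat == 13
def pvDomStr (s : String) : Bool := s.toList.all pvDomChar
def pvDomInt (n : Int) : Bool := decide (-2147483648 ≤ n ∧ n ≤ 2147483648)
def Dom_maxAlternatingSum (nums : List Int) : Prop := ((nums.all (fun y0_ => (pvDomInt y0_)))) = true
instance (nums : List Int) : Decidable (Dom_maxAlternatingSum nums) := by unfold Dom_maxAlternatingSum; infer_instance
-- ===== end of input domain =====

-- B replaces A's sort-by-abs + two-pointer end-pairing loop by a sort-free rank count: each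
-- square is added with + if at least half of the squares precede it (pairwise comparison with a
-- stable index tie-break), with - otherwise (objective: alternative; B is O(n^2), not faster).
-- A sorts its argument in place; B does not — the equivalence proved is about the return value.

-- ===== PORT A =====
-- the 'while r >= l' loop; the indices read are always in range (0 ≤ l ≤ r < length when
-- the body runs), so pyGetD with default 0 is exact here
def pvLoopA (s : List Int) (l r res : Int) : Int :=
  if r ≥ l then
    pvLoopA s (l + 1) (r - 1)
      (if r ≠ l then res + (PySem.List.pyGetD s r 0) ^ 2 - (PySem.List.pyGetD s l 0) ^ 2
       else res + (PySem.List.pyGetD s r 0) ^ 2)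
  else res
termination_by (r + 1 - l).toNat
decreasing_by omega

def maxAlternatingSum (nums : List Int) : Int :=
  let s := PySem.List.sorted nums (fun x => |x|) false
  pvLoopA s 0 ((s.length : Int) - 1) 0

-- ===== PORT B =====
def maxAlternatingSum_alt (nums : List Int) : Int :=
  let sq := nums.map (fun x => x * x)
  let half : Nat := sq.length / 2
  (PySem.List.enumerate sq).foldl (fun res is =>
      let rank : Int := (PySem.List.enumerate sq).foldl
        (fun rank jt => if jt.2 < is.2 ∨ (jt.2 = is.2 ∧ jt.1 < is.1) then rank + 1 else rank) 0
      if rank ≥ (half : Int) then res + is.2 else res - is.2) 0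

-- ===== PRECONDITION & SPEC =====
def Spec_maxAlternatingSum (nums : List Int) (out : Int) : Prop := out = maxAlternatingSum_alt nums
instance (nums : List Int) (out : Int) : Decidable (Spec_maxAlternatingSum nums out) := by unfold Spec_maxAlternatingSum; infer_instance

-- ===== CLAIM (what is proved, stated in full; the proofs are below) =====
def Claim_equal_maxAlternatingSum : Prop := ∀ (nums : List Int), Dom_maxAlternatingSum nums → Spec_maxAlternatingSum nums (maxAlternatingSum nums)

-- ===== LEMMAS AND PROOFS =====

-- A's loop over the segment s[l..r]: value = res + Σ upper half of squares − Σ lower half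
theorem pvLoopA_eq (s : List Int) (d : Nat) : ∀ (l r : Nat) (res : Int), r - l = d →
    r < s.length → l ≤ r →
    pvLoopA s (l : Int) (r : Int) res =
      res + ((((s.drop l).take (r + 1 - l)).map (fun x => x ^ 2)).drop ((r + 1 - l) / 2)).sum
          - ((((s.drop l).take (r + 1 - l)).map (fun x => x ^ 2)).take ((r + 1 - l) / 2)).sum := by
  induction d using Nat.strong_induction_on with
  | _ d ih =>
    intro l r res hd hr hlr
    have hlr' : l < s.length := lt_of_le_of_lt hlr hr
    have hgl : (l : Int) ≤ (r : Int) := by exact_mod_cast hlr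
    rw [pvLoopA, if_pos hgl]
    have hgr : PySem.List.pyGetD s (r : Int) 0 = s[r] := by
      rw [PySem.List.pyGetD_natCast, List.getD_eq_getElem s 0 hr]
    have hgl2 : PySem.List.pyGetD s (l : Int) 0 = s[l] := by
      rw [PySem.List.pyGetD_natCast, List.getD_eq_getElem s 0 hlr']
    rcases Nat.eq_or_lt_of_le hlr with heq | hlt
    · -- l = r : single middle element, then the loop exits
      subst heq
      rw [if_neg (by simp)]
      rw [pvLoopA, if_neg (by omega)]
      have h1 : l + 1 - l = 1 := by omega
      have htake1 : (s.drop l).take 1 = [s[l]] := by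
        rw [List.drop_eq_getElem_cons hlr']
        rfl
      rw [h1, htake1, hgr]
      norm_num
    · -- l < r
      rw [if_pos (by exact_mod_cast Nat.ne_of_lt' hlt)]
      have hl1 : ((l : Int) + 1) = ((l + 1 : Nat) : Int) := by push_cast; ring
      have hr1 : ((r : Int) - 1) = ((r - 1 : Nat) : Int) := by omega
      rw [hl1, hr1]
      -- decompose the segment: seg = s[l] :: (A ++ [s[r]])
      have h3 : (s.drop (l+1))[r - l - 1]?.toList = [s[r]] := by
        rw [List.getElem?_drop, List.getElem?_eq_getElem (by omega)]
        have : l + 1 + (r - l - 1) = r := by omega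
        simp [this]
      have hA : (s.drop l).take (r + 1 - l)
          = s[l] :: ((s.drop (l+1)).take (r - 1 - l) ++ [s[r]]) := by
        rw [List.drop_eq_getElem_cons hlr']
        have h1 : r + 1 - l = ((r - l - 1) + 1) + 1 := by omega
        rw [h1, List.take_succ_cons, List.take_add_one, h3]
        have h4 : r - l - 1 = r - 1 - l := by omega
        rw [h4]
      rcases Nat.lt_or_ge d 2 with hd2 | hd2
      · -- d = 1 : the next call exits immediately
        rw [pvLoopA, if_neg (by omega)]
        have hA0 : (s.drop (l+1)).take (r - 1 - l) = [] := by
          have : r - 1 - l = 0 := by omega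
          simp [this]
        rw [hA, hA0]
        have hhalf : (r + 1 - l) / 2 = 1 := by omega
        rw [hhalf, hgr, hgl2]
        simp
      · -- d ≥ 2 : recurse, pairing off the two end elements
        have ihv := ih (d - 2) (by omega) (l + 1) (r - 1)
          (res + (PySem.List.pyGetD s (r:Int) 0) ^ 2 - (PySem.List.pyGetD s (l:Int) 0) ^ 2)
          (by omega) (by omega) (by omega)
        rw [ihv, hgr, hgl2, hA]
        have hseg' : r - 1 + 1 - (l + 1) = r - 1 - l := by omega
        rw [hseg']
        set A := ((s.drop (l+1)).take (r - 1 - l)).map (fun x => x ^ 2) with hAdef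
        have hALenA : A.length = r - 1 - l := by
          simp [hAdef]
          omega
        have hhalf : (r + 1 - l) / 2 = (r - 1 - l) / 2 + 1 := by omega
        have hle : (r - 1 - l) / 2 ≤ A.length := by omega
        rw [List.map_cons, List.map_append, List.map_singleton]
        rw [hhalf]
        rw [List.drop_succ_cons, List.take_succ_cons]
        rw [List.drop_append_of_le_length hle, List.take_append_of_le_length hle]
        simp
        ring

-- squaring an abs-sorted list gives the sorted list of squares
theorem sq_sorted (nums : List Int) :
    (PySem.List.sorted nums (fun x => |x|) false).map (fun x => x * x) =
      PySem.List.sorted (nums.map (fun x => x * x)) (fun x => x) false := by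
  refine (PySem.List.sorted_id_eq_of_perm_of_pairwise (nums.map (fun x => x * x))
      ((PySem.List.sorted nums (fun x => |x|) false).map (fun x => x * x)) ?_ ?_).symm
  · exact (PySem.List.sorted_perm nums (fun x => |x|) false).map _
  · refine List.pairwise_map.mpr ?_
    refine (PySem.List.sorted_pairwise nums (fun x => |x|)).imp ?_
    intro a b h
    calc a * a = |a| * |a| := (abs_mul_abs_self a).symm
      _ ≤ |b| * |b| := mul_self_le_mul_self (abs_nonneg a) h
      _ = b * b := abs_mul_abs_self b

-- A's value, closed: upper-half sum minus lower-half sum of the sorted squares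
theorem A_val (nums : List Int) :
    maxAlternatingSum nums =
      ((PySem.List.sorted (nums.map (fun x => x * x)) (fun x => x) false).drop
          (nums.length / 2)).sum -
      ((PySem.List.sorted (nums.map (fun x => x * x)) (fun x => x) false).take
          (nums.length / 2)).sum := by
  set s := PySem.List.sorted nums (fun x => |x|) false with hs
  set sqs := PySem.List.sorted (nums.map (fun x => x * x)) (fun x => x) false with hsqdef
  show pvLoopA s 0 ((s.length : Int) - 1) 0
      = (sqs.drop (nums.length / 2)).sum - (sqs.take (nums.length / 2)).sum
  have hsq : s.map (fun x => x ^ 2) = sqs := by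
    rw [hsqdef, ← sq_sorted nums, ← hs]
    exact List.map_congr_left (fun x _ => sq x)
  have hslen : s.length = nums.length := PySem.List.length_sorted ..
  rcases eq_or_ne s [] with hnil | hne
  · have hn0 : nums.length = 0 := by rw [← hslen, hnil]; rfl
    rw [hnil] at hsq
    rw [hnil, pvLoopA, if_neg (by norm_num)]
    simp [← hsq, hn0]
  · have hn : 1 ≤ s.length := List.length_pos_of_ne_nil hne
    have hcast : ((s.length : Int) - 1) = ((s.length - 1 : Nat) : Int) := by omega
    rw [hcast]
    have := pvLoopA_eq s (s.length - 1) 0 (s.length - 1) 0 rfl (by omega) (by omega)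
    rw [(by norm_num : ((0 : Nat) : Int) = (0 : Int))] at this
    rw [this]
    have hfull : (s.drop 0).take (s.length - 1 + 1 - 0) = s := by
      rw [List.drop_zero]
      have : s.length - 1 + 1 - 0 = s.length := by omega
      rw [this, List.take_length]
    rw [hfull, hsq]
    have hhalf : s.length - 1 + 1 - 0 = nums.length := by omega
    rw [hhalf]
    ring

-- ===== B-side lemmas =====

-- B's stable rank, mathematically
def pvRankN (sq : List Int) (i : Nat) : Nat :=
  sq.countP (fun t => t < sq.getD i 0) + (sq.take i).count (sq.getD i 0)

-- the inner 'for j, t in enumerate(sq)' loop counts pvRankN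
theorem inner_fold (s : Int) (i : Nat) : ∀ (xs : List Int) (s0 : Nat) (acc : Int),
    (PySem.List.enumerate xs (s0 : Int)).foldl
        (fun rank jt => if jt.2 < s ∨ (jt.2 = s ∧ jt.1 < (i : Int)) then rank + 1 else rank) acc
      = acc + (xs.countP (fun t => t < s) : Int) + ((xs.take (i - s0)).count s : Int) := by
  intro xs
  induction xs with
  | nil => intro s0 acc; simp [PySem.List.enumerate_nil]
  | cons x xs ih =>
    intro s0 acc
    rw [PySem.List.enumerate_cons, List.foldl_cons]
    have hc : ((s0 : Int) + 1) = ((s0 + 1 : Nat) : Int) := by push_cast; ring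
    rw [hc, ih (s0 + 1)]
    rw [List.countP_cons]
    by_cases h0 : s0 < i
    · have h1 : i - s0 = (i - (s0 + 1)) + 1 := by omega
      rw [h1, List.take_succ_cons, List.count_cons]
      have hcond : ((s0 : Int) < (i : Int)) := by exact_mod_cast h0
      by_cases hx1 : x < s <;> by_cases hx2 : x = s <;>
        simp [hx1, hx2, hcond] <;> push_cast <;> ring
    · have h1 : i - s0 = 0 := by omega
      have h2 : i - (s0 + 1) = 0 := by omega
      rw [h1, h2]
      have hcond : ¬ ((s0 : Int) < (i : Int)) := by exact_mod_cast h0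
      by_cases hx1 : x < s <;> simp [hx1, hcond] <;> push_cast <;> ring

-- countP(< s) + count s = countP(≤ s)
theorem countP_lt_add_count (xs : List Int) (s : Int) :
    xs.countP (fun t => t < s) + xs.count s = xs.countP (fun t => t ≤ s) := by
  induction xs with
  | nil => simp
  | cons x xs ih =>
    rw [List.countP_cons, List.countP_cons, List.count_cons, ← ih]
    by_cases h1 : x < s <;> by_cases h2 : x = s <;>
      simp [h1, h2, le_of_lt] <;> omega

theorem take_count_mono (xs : List Int) (s : Int) {i i' : Nat} (h : i ≤ i') :
    (xs.take i).count s ≤ (xs.take i').count s := by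
  calc (xs.take i).count s = ((xs.take i').take i).count s := by
        rw [List.take_take, min_eq_left h]
    _ ≤ (xs.take i').count s := (List.take_sublist _ _).count_le s

theorem take_count_strict (xs : List Int) {i : Nat} (hi : i < xs.length) :
    (xs.take i).count (xs.getD i 0) + 1 ≤ (xs.take (i + 1)).count (xs.getD i 0) := by
  rw [List.getD_eq_getElem xs 0 hi, List.take_add_one, List.getElem?_eq_getElem hi,
    List.count_append]
  simp

theorem rank_lt (sq : List Int) {i : Nat} (hi : i < sq.length) :
    pvRankN sq i < sq.countP (fun t => t < sq.getD i 0) + sq.count (sq.getD i 0) := by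
  unfold pvRankN
  have h1 := take_count_strict sq hi
  have h2 := take_count_mono sq (sq.getD i 0) (show i + 1 ≤ sq.length from hi)
  rw [List.take_length] at h2
  omega

-- the element of the sorted list at any position inside the window of value s is s
theorem sorted_window (S : List Int) (hS : S.Pairwise (· ≤ ·)) (s : Int) (p : Nat)
    (hp : p < S.length) (h1 : S.countP (fun t => t < s) ≤ p)
    (h2 : p < S.countP (fun t => t < s) + S.count s) : S.getD p 0 = s := by
  have hget := List.pairwise_iff_getElem.mp hS
  rw [List.getD_eq_getElem S 0 hp]
  rcases lt_trichotomy S[p] s with hlt | heq | hgt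
  · exfalso
    have hc : (S.take (p + 1)).countP (fun t => t < s) = p + 1 := by
      have hall : ∀ a ∈ S.take (p + 1), (fun t => decide (t < s)) a = true := by
        intro a ha
        obtain ⟨k, hk, hka⟩ := List.mem_iff_getElem.mp ha
        have hk' : k < S.length := by
          have := List.length_take_le (p + 1) S
          omega
        have hkv : a = S[k] := by
          rw [← hka, List.getElem_take]
        have hle : S[k] ≤ S[p] := by
          rcases Nat.lt_or_ge k p with hkp | hkp
          · exact hget k p hk' hp hkp
          · have : k = p := by
              have := List.length_take_le (p + 1) S
              omega
            subst this; exact le_refl _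
        simp only [decide_eq_true_eq]
        rw [hkv]; exact lt_of_le_of_lt hle hlt
      rw [List.countP_eq_length.mpr hall, List.length_take]
      omega
    have hcle : (S.take (p + 1)).countP (fun t => t < s) ≤ S.countP (fun t => t < s) :=
      (List.take_sublist _ _).countP_le
    omega
  · exact heq
  · exfalso
    have hdrop : (S.drop p).countP (fun t => t ≤ s) = 0 := by
      rw [List.countP_eq_zero]
      intro a ha
      obtain ⟨k, hk, hka⟩ := List.mem_iff_getElem.mp ha
      have hk' : p + k < S.length := by
        rw [List.length_drop] at hk; omega
      have hkv : a = S[p + k] := by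
        rw [← hka, List.getElem_drop]
      have hge : S[p] ≤ S[p + k] := by
        rcases Nat.eq_or_lt_of_le (Nat.le_add_right p k) with hpk | hpk
        · exact le_of_eq (by congr 1)
        · exact hget p (p + k) hp hk' hpk
      simp only [decide_eq_true_eq]
      rw [hkv]; omega
    have hsplit : S.countP (fun t => t ≤ s) =
        (S.take p).countP (fun t => t ≤ s) + (S.drop p).countP (fun t => t ≤ s) := by
      conv_lhs => rw [← List.take_append_drop p S]
      rw [List.countP_append]
    have htle : (S.take p).countP (fun t => t ≤ s) ≤ p := by
      have := List.countP_le_length (p := fun t => decide (t ≤ s)) (l := S.take p)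
      rw [List.length_take] at this
      omega
    have hcc := countP_lt_add_count S s
    omega

theorem rank_ne_of_lt (sq : List Int) {i i' : Nat} (hi' : i' < sq.length) (h : i < i') :
    pvRankN sq i ≠ pvRankN sq i' := by
  have hi : i < sq.length := lt_trans h hi'
  rcases lt_trichotomy (sq.getD i 0) (sq.getD i' 0) with h1 | h1 | h1
  · -- rank i < countP(≤ s) ≤ countP(< s') ≤ rank i'
    have ha := rank_lt sq hi
    have hb := countP_lt_add_count sq (sq.getD i 0)
    have hc : sq.countP (fun t => t ≤ sq.getD i 0) ≤ sq.countP (fun t => t < sq.getD i' 0) := by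
      refine List.countP_mono_left ?_
      intro a _ hd
      simp only [decide_eq_true_eq] at hd ⊢
      omega
    have hd : sq.countP (fun t => t < sq.getD i' 0) ≤ pvRankN sq i' := Nat.le_add_right _ _
    unfold pvRankN at *
    omega
  · -- equal values: the stable tie-break separates the ranks
    have hst := take_count_strict sq hi
    have hm := take_count_mono sq (sq.getD i 0) (show i + 1 ≤ i' from h)
    unfold pvRankN
    rw [← h1]
    omega
  · -- rank i' < countP(≤ s') ≤ countP(< s) ≤ rank i
    have ha := rank_lt sq hi'
    have hb := countP_lt_add_count sq (sq.getD i' 0)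
    have hc : sq.countP (fun t => t ≤ sq.getD i' 0) ≤ sq.countP (fun t => t < sq.getD i 0) := by
      refine List.countP_mono_left ?_
      intro a _ hd
      simp only [decide_eq_true_eq] at hd ⊢
      omega
    have hd : sq.countP (fun t => t < sq.getD i 0) ≤ pvRankN sq i := Nat.le_add_right _ _
    unfold pvRankN at *
    omega

theorem rank_injOn (sq : List Int) {i i' : Nat} (hi : i < sq.length) (hi' : i' < sq.length)
    (hne : i ≠ i') : pvRankN sq i ≠ pvRankN sq i' := by
  rcases Nat.lt_or_ge i i' with h | h
  · exact rank_ne_of_lt sq hi' h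
  · exact (rank_ne_of_lt sq hi (by omega)).symm

-- sum over take/drop as range sums
theorem take_sum (S : List Int) (k : Nat) (hk : k ≤ S.length) :
    (S.take k).sum = ∑ p ∈ Finset.range k, S.getD p 0 := by
  induction k with
  | zero => simp
  | succ k ih =>
    rw [List.take_add_one, List.sum_append, ih (by omega), Finset.sum_range_succ]
    simp
    rw [List.getElem?_eq_getElem (by omega)]
    simp

-- the outer 'for i, s in enumerate(sq)' loop as a map-sum
theorem outer_fold (sq : List Int) (half : Nat) : ∀ (l : List (Int × Int)) (acc : Int),
    l.foldl (fun res is =>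
      let rank : Int := (PySem.List.enumerate sq).foldl
        (fun rank jt => if jt.2 < is.2 ∨ (jt.2 = is.2 ∧ jt.1 < is.1) then rank + 1 else rank) 0
      if rank ≥ (half : Int) then res + is.2 else res - is.2) acc
    = acc + (l.map (fun is =>
        if (PySem.List.enumerate sq).foldl
            (fun rank jt => if jt.2 < is.2 ∨ (jt.2 = is.2 ∧ jt.1 < is.1) then rank + 1 else rank) 0
          ≥ (half : Int) then is.2 else -is.2)).sum := by
  intro l
  induction l with
  | nil => intro acc; simp
  | cons x xs ih =>
    intro acc
    rw [List.foldl_cons, List.map_cons, List.sum_cons]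
    dsimp only
    rw [ih]
    split <;> ring

theorem range_map_sum (f : Nat → Int) : ∀ (n : Nat),
    ((List.range n).map f).sum = ∑ p ∈ Finset.range n, f p := by
  intro n
  induction n with
  | zero => simp
  | succ n ih => rw [List.range_succ, List.map_append, List.sum_append, Finset.sum_range_succ, ih]; simp

-- B's value, closed
theorem B_val (nums : List Int) :
    maxAlternatingSum_alt nums =
      ((PySem.List.sorted (nums.map (fun x => x * x)) (fun x => x) false).drop
          (nums.length / 2)).sum -
      ((PySem.List.sorted (nums.map (fun x => x * x)) (fun x => x) false).take
          (nums.length / 2)).sum := by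
  set sq := nums.map (fun x => x * x) with hsqdef
  set S := PySem.List.sorted sq (fun x => x) false with hSdef
  set n := sq.length with hndef
  have hnn : nums.length = n := by rw [hndef, hsqdef, List.length_map]
  set half := n / 2 with hhalfdef
  have hSlen : S.length = n := PySem.List.length_sorted ..
  have hSperm : S.Perm sq := PySem.List.sorted_perm ..
  have hSpair : S.Pairwise (· ≤ ·) := PySem.List.sorted_pairwise sq (fun x => x)
  rw [hnn]
  show (PySem.List.enumerate sq).foldl (fun res is =>
      let rank : Int := (PySem.List.enumerate sq).foldl
        (fun rank jt => if jt.2 < is.2 ∨ (jt.2 = is.2 ∧ jt.1 < is.1) then rank + 1 else rank) 0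
      if rank ≥ (half : Int) then res + is.2 else res - is.2) 0
    = (S.drop half).sum - (S.take half).sum
  rw [outer_fold sq half]
  -- rank bounds and the value the sorted list holds at each rank
  have hrank : ∀ k, k < n → pvRankN sq k < n ∧ S.getD (pvRankN sq k) 0 = sq.getD k 0 := by
    intro k hk
    have hlt := rank_lt sq (show k < sq.length from hk)
    have hcc := countP_lt_add_count sq (sq.getD k 0)
    have hlen := List.countP_le_length (p := fun t => decide (t ≤ sq.getD k 0)) (l := sq)
    have hn1 : pvRankN sq k < n := by unfold pvRankN at *; omega
    refine ⟨hn1, ?_⟩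
    refine sorted_window S hSpair (sq.getD k 0) (pvRankN sq k) (by omega) ?_ ?_
    · rw [hSperm.countP_eq]
      exact Nat.le_add_right _ _
    · rw [hSperm.countP_eq, hSperm.count_eq]
      exact hlt
  -- each enumerate term is the rank-indexed read of the sorted list
  have hmap : ((PySem.List.enumerate sq).map (fun is =>
        if (PySem.List.enumerate sq).foldl
            (fun rank jt => if jt.2 < is.2 ∨ (jt.2 = is.2 ∧ jt.1 < is.1) then rank + 1 else rank) 0
          ≥ (half : Int) then is.2 else -is.2))
      = (List.range n).map (fun k =>
          if half ≤ pvRankN sq k then S.getD (pvRankN sq k) 0 else -(S.getD (pvRankN sq k) 0)) := by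
    refine List.ext_getElem (by simp [PySem.List.length_enumerate]; exact hndef.symm) ?_
    intro k hk1 hk2
    have hkn : k < n := by simpa using hk2
    rw [List.getElem_map, List.getElem_map, List.getElem_range,
      PySem.List.getElem_enumerate]
    have hIF := inner_fold (sq[k]'hkn) k sq 0 0
    norm_num at hIF
    have hgd : sq.getD k 0 = sq[k]'hkn := List.getD_eq_getElem sq 0 hkn
    have hrk := hrank k hkn
    rw [hgd] at hrk
    have hrv : (sq.countP (fun t => t < sq[k]'hkn) : Int) + ((sq.take k).count (sq[k]'hkn) : Int)
        = ((pvRankN sq k : Nat) : Int) := by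
      unfold pvRankN
      rw [hgd]
      push_cast
      ring
    dsimp only
    rw [(by norm_num : (0 : Int) + (k : Int) = (k : Int)), hIF, hrv, hrk.2]
    rcases Nat.lt_or_ge (pvRankN sq k) half with hcase | hcase
    · rw [if_neg (by exact_mod_cast Nat.not_le_of_lt hcase), if_neg (Nat.not_le_of_lt hcase)]
    · rw [if_pos (by exact_mod_cast hcase), if_pos hcase]
  rw [hmap, range_map_sum]
  -- transport the sum along the rank bijection of {0, …, n-1}
  have himage : (Finset.range n).image (fun k => pvRankN sq k) = Finset.range n := by
    refine Finset.eq_of_subset_of_card_le ?_ ?_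
    · intro p hp
      obtain ⟨k, hk, hkp⟩ := Finset.mem_image.mp hp
      rw [Finset.mem_range] at hk ⊢
      rw [← hkp]
      exact (hrank k hk).1
    · rw [Finset.card_image_of_injOn, Finset.card_range]
      intro a ha b hb hab
      by_contra hne
      exact rank_injOn sq (Finset.mem_range.mp ha) (Finset.mem_range.mp hb) hne hab
  have hbij : ∑ k ∈ Finset.range n,
        (if half ≤ pvRankN sq k then S.getD (pvRankN sq k) 0 else -(S.getD (pvRankN sq k) 0))
      = ∑ p ∈ Finset.range n, (if half ≤ p then S.getD p 0 else -(S.getD p 0)) := by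
    conv_rhs => rw [← himage]
    rw [Finset.sum_image]
    intro a ha b hb hab
    by_contra hne
    exact rank_injOn sq (Finset.mem_range.mp ha) (Finset.mem_range.mp hb) hne hab
  rw [hbij]
  -- split the position sum at half
  have hhn : half ≤ n := Nat.div_le_self n 2
  have hsplit : ∑ p ∈ Finset.range n, (if half ≤ p then S.getD p 0 else -(S.getD p 0))
      = (∑ p ∈ Finset.Ico half n, S.getD p 0) - ∑ p ∈ Finset.range half, S.getD p 0 := by
    have e1 : ∑ p ∈ Finset.range half, (if half ≤ p then S.getD p 0 else -(S.getD p 0))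
        = -∑ p ∈ Finset.range half, S.getD p 0 := by
      rw [← Finset.sum_neg_distrib]
      refine Finset.sum_congr rfl ?_
      intro p hp
      rw [if_neg (by rw [Finset.mem_range] at hp; omega)]
    have e2 : ∑ p ∈ Finset.Ico half n, (if half ≤ p then S.getD p 0 else -(S.getD p 0))
        = ∑ p ∈ Finset.Ico half n, S.getD p 0 := by
      refine Finset.sum_congr rfl ?_
      intro p hp
      rw [if_pos (by rw [Finset.mem_Ico] at hp; omega)]
    rw [Finset.range_eq_Ico, ← Finset.sum_Ico_consecutive _ (Nat.zero_le half) hhn,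
      ← Finset.range_eq_Ico, e1, e2]
    ring
  rw [hsplit]
  have htk := take_sum S half (by omega)
  have htn := take_sum S n (by omega)
  rw [List.take_of_length_le (by omega : S.length ≤ n)] at htn
  have hds : (S.drop half).sum = S.sum - (S.take half).sum := by
    have := List.take_append_drop half S
    have hsum : (S.take half).sum + (S.drop half).sum = S.sum := by
      conv_rhs => rw [← this]
      rw [List.sum_append]
    omega
  have hico : ∑ p ∈ Finset.Ico half n, S.getD p 0
      = (∑ p ∈ Finset.range n, S.getD p 0) - ∑ p ∈ Finset.range half, S.getD p 0 := by
    rw [Finset.range_eq_Ico, ← Finset.sum_Ico_consecutive _ (Nat.zero_le half) hhn,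
      ← Finset.range_eq_Ico]
    ring
  rw [hico, ← htn, ← htk, hds]
  ring

-- ===== VERDICT (by name: the statement is the Claim_ definition above) =====
theorem maxAlternatingSum_spec : Claim_equal_maxAlternatingSum := by
  intro nums _
  unfold Spec_maxAlternatingSum
  rw [A_val, B_val]
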